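-- pv_equiv track=rewrite | github.com/ytian02/DailyPaper | pipeline.py | _insert_after_heading
-- ===== SOURCE A (Python) =====
-- def _insert_after_heading(markdown: str, heading: str, inserted_lines: list[str]) -> str:
--     if not inserted_lines or heading not in markdown:
--         return markdown
--
--     lines = markdown.splitlines()
--     output = []
--     inserted = False
--     for index, line in enumerate(lines):
--         output.append(line)
--         if not inserted and line.strip() == heading:
--             output.append("")
--             output.extend(inserted_lines)
--             if index + 1 < len(lines) and lines[index + 1].strip():
--                 output.append("")
--             inserted = True
--     return "\n".join(output)
-- ===== SOURCE B (Python) =====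
-- def _insert_after_heading(markdown: str, heading: str, inserted_lines: list[str]) -> str:
--     if not inserted_lines or heading not in markdown:
--         return markdown
--     lines = markdown.splitlines()
--     idx = next((i for i, l in enumerate(lines) if l.strip() == heading), None)
--     if idx is None:
--         return "\n".join(lines)
--     tail = lines[idx + 1:]
--     gap = [""] if tail and tail[0].strip() else []
--     return "\n".join(lines[:idx + 1] + [""] + inserted_lines + gap + tail)
-- ===== Notes on version B (the rewrite author's own statement) =====
-- stated objective: simpler
-- what changed: Replaces the flag-carrying append-every-line loop with a find-first-matching-index then slice-and-concatenate construction.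
import Mathlib
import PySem

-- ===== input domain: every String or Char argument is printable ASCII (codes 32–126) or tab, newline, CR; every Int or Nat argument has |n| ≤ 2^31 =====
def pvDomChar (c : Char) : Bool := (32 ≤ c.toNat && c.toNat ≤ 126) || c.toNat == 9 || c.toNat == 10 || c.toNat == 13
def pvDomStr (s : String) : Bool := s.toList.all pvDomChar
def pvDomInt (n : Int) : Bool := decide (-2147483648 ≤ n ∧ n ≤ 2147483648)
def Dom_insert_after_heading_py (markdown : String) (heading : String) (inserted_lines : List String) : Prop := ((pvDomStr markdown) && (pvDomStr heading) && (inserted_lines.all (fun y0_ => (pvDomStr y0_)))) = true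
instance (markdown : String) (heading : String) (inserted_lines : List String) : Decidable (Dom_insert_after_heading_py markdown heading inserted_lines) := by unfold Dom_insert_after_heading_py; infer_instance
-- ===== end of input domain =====

-- B replaces A's flag-carrying append loop by find-first-index then slice-and-concatenate (objective: simpler).
-- ===== PORT A =====
-- A's loop body: output.append(line); on first stripped-line match append "", inserted_lines, maybe ""
def pyABody (heading : String) (inserted_lines : List String) (lines : List String)
    (st : List String × Bool) (p : Int × String) : List String × Bool :=
  let output := st.1 ++ [p.2]
  if !st.2 && (PySem.Str.strip p.2 == heading) then
    let output := output ++ [""] ++ inserted_lines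
    let output :=
      if p.1 + 1 < (lines.length : Int) &&
         !(PySem.Str.strip (PySem.List.pyGetD lines (p.1 + 1) "") == "") then
        output ++ [""]
      else output
    (output, true)
  else (output, st.2)

def insert_after_heading_py (markdown : String) (heading : String) (inserted_lines : List String) : String :=
  if inserted_lines = [] || !(PySem.Str.isIn heading markdown) then markdown
  else
    let lines := PySem.Str.splitlines markdown
    let res := (PySem.List.enumerate lines 0).foldl
      (pyABody heading inserted_lines lines) ([], false)
    PySem.Str.join "\n" res.1

-- ===== PORT B =====
def insert_after_heading_py_alt (markdown : String) (heading : String) (inserted_lines : List String) : String :=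
  if inserted_lines = [] || !(PySem.Str.isIn heading markdown) then markdown
  else
    let lines := PySem.Str.splitlines markdown
    match lines.findIdx? (fun l => PySem.Str.strip l == heading) with
    | none => PySem.Str.join "\n" lines
    | some idx =>
      let tail := lines.drop (idx + 1)
      let gap := match tail with
        | [] => []
        | t :: _ => if !(PySem.Str.strip t == "") then [""] else []
      PySem.Str.join "\n" (lines.take (idx + 1) ++ [""] ++ inserted_lines ++ gap ++ tail)

-- ===== PRECONDITION & SPEC =====
def Spec_insert_after_heading_py (markdown : String) (heading : String) (inserted_lines : List String) (out : String) : Prop := out = insert_after_heading_py_alt markdown heading inserted_lines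
instance (markdown : String) (heading : String) (inserted_lines : List String) (out : String) : Decidable (Spec_insert_after_heading_py markdown heading inserted_lines out) := by unfold Spec_insert_after_heading_py; infer_instance

-- ===== CLAIM (what is proved, stated in full; the proofs are below) =====
def Claim_equal_insert_after_heading_py : Prop := ∀ (markdown : String) (heading : String) (inserted_lines : List String), Dom_insert_after_heading_py markdown heading inserted_lines → Spec_insert_after_heading_py markdown heading inserted_lines (insert_after_heading_py markdown heading inserted_lines)

-- ===== LEMMAS AND PROOFS =====

-- once inserted, the loop only appends each remaining line
theorem foldl_pyABody_true (heading : String) (ins lines : List String)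
    (l : List (Int × String)) (acc : List String) :
    l.foldl (pyABody heading ins lines) (acc, true) = (acc ++ l.map (·.2), true) := by
  induction l generalizing acc with
  | nil => simp
  | cons p rest ih => simp [pyABody, ih]

-- while no line matched, the loop only appends each line
theorem foldl_pyABody_false (heading : String) (ins lines : List String)
    (xs : List String) (h : ∀ x ∈ xs, (PySem.Str.strip x == heading) = false)
    (s : Int) (acc : List String) :
    (PySem.List.enumerate xs s).foldl (pyABody heading ins lines) (acc, false)
      = (acc ++ xs, false) := by
  induction xs generalizing s acc with
  | nil => simp [PySem.List.enumerate_nil]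
  | cons x rest ih =>
    have hx : (PySem.Str.strip x == heading) = false := h x (by simp)
    have hr : ∀ y ∈ rest, (PySem.Str.strip y == heading) = false := fun y hy => h y (by simp [hy])
    rw [PySem.List.enumerate_cons]
    simp only [List.foldl_cons]
    rw [show pyABody heading ins lines (acc, false) (s, x) = (acc ++ [x], false) by
      simp [pyABody, hx]]
    rw [ih hr]
    simp

theorem loop_res (heading : String) (ins lines : List String) :
    ((PySem.List.enumerate lines 0).foldl (pyABody heading ins lines) ([], false)).1
      = (match lines.findIdx? (fun l => PySem.Str.strip l == heading) with
         | none => lines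
         | some idx =>
           let tail := lines.drop (idx + 1)
           let gap : List String := match tail with
             | [] => []
             | t :: _ => if !(PySem.Str.strip t == "") then [""] else []
           lines.take (idx + 1) ++ [""] ++ ins ++ gap ++ tail) := by
  cases hfi : lines.findIdx? (fun l => PySem.Str.strip l == heading) with
  | none =>
    have h := List.findIdx?_eq_none_iff.mp hfi
    rw [foldl_pyABody_false heading ins lines lines h 0 []]
    simp
  | some idx =>
    obtain ⟨hlt, hpred, hbefore⟩ := List.findIdx?_eq_some_iff_getElem.mp hfi
    -- split lines at idx
    have hsplit : lines = lines.take idx ++ lines[idx] :: lines.drop (idx + 1) := by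
      conv_lhs => rw [← List.take_append_drop idx lines]
      rw [List.drop_eq_getElem_cons hlt]
    have hlen : (lines.take idx).length = idx := by simp [Nat.le_of_lt hlt]
    have hbef : ∀ x ∈ lines.take idx, (PySem.Str.strip x == heading) = false := by
      intro x hx
      obtain ⟨j, hj, rfl⟩ := List.getElem_of_mem hx
      have hj' : j < idx := by simpa [hlen] using hj
      have := hbefore j hj'
      simp only [List.getElem_take]
      simpa using this
    have henum : PySem.List.enumerate lines 0
        = PySem.List.enumerate (lines.take idx) 0
          ++ PySem.List.enumerate (lines[idx] :: lines.drop (idx + 1)) (0 + (lines.take idx).length) := by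
      conv_lhs => rw [hsplit]
      rw [PySem.List.enumerate_append]
    rw [henum, List.foldl_append]
    rw [foldl_pyABody_false heading ins lines _ hbef 0 []]
    rw [PySem.List.enumerate_cons, List.foldl_cons]
    rw [show pyABody heading ins lines (([] : List String) ++ lines.take idx, false)
          (0 + (lines.take idx).length, lines[idx])
        = ((lines.take idx ++ [lines[idx]] ++ [""] ++ ins ++
            (if (idx : Int) + 1 < (lines.length : Int) &&
                !(PySem.Str.strip (PySem.List.pyGetD lines ((idx : Int) + 1) "") == "") then
               [""] else [])), true) by
      simp only [pyABody, hpred, hlen, zero_add, Bool.not_false, Bool.true_and]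
      split_ifs <;> simp
    ]
    rw [foldl_pyABody_true]
    simp only [PySem.List.map_snd_enumerate]
    have htake : lines.take (idx + 1) = lines.take idx ++ [lines[idx]] := by
      rw [List.take_add_one]
      simp [List.getElem?_eq_getElem hlt]
    rw [htake]
    by_cases hc : idx + 1 < lines.length
    · have hdrop : lines.drop (idx + 1) = lines[idx+1] :: lines.drop (idx + 2) := by
        rw [List.drop_eq_getElem_cons hc]
      have hget : PySem.List.pyGetD lines ((idx : Int) + 1) "" = lines[idx+1] := by
        have : ((idx : Int) + 1) = ((idx + 1 : Nat) : Int) := by push_cast; ring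
        rw [this, PySem.List.pyGetD_natCast]
        simp [List.getElem?_eq_getElem hc]
      have hcInt : ((idx : Int) + 1 < (lines.length : Int)) = True := by
        simp; exact_mod_cast hc
      simp only [hdrop, hget, hcInt, decide_true, Bool.true_and]
    · have hdrop : lines.drop (idx + 1) = [] := by
        rw [List.drop_eq_nil_iff]; omega
      have hcInt : ¬((idx : Int) + 1 < (lines.length : Int)) := by
        intro h; have : idx + 1 < lines.length := by exact_mod_cast h
        exact hc this
      simp [hdrop, hcInt]

-- ===== VERDICT (by name: the statement is the Claim_ definition above) =====
theorem insert_after_heading_py_spec : Claim_equal_insert_after_heading_py := by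
  intro markdown heading inserted_lines _
  unfold Spec_insert_after_heading_py insert_after_heading_py insert_after_heading_py_alt
  split_ifs with hg
  · rfl
  · dsimp only
    rw [loop_res]
    cases hfi : (PySem.Str.splitlines markdown).findIdx? (fun l => PySem.Str.strip l == heading) <;>
      simp
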